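-- pv_equiv track=rewrite | github.com/RishabhGoswami/Algo.py | N queens.py | solvenq
-- ===== SOURCE A (Python) =====
-- n=4
--
-- def issafe(board,row,col):
--
--     a=row
--     b=col
--     for i in range(col):
--         if(board[row][i]==1):
--             return False
--
--     row=a
--     col=b
--     while(row>=0 and col>=0):
--         if(board[row][col]==1):
--             return False
--         row-=1
--         col-=1
--
--     row=a
--     col=b
--     while(row<n and col>=0):
--         if(board[row][col]==1):
--             return False
--         row+=1
--         col-=1
--
--     return True
--
-- def solvenq(board,col):
--     if(col==4):
--         return True
--     for i in range(0,4):
--         if(issafe(board,i,col)):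
--             board[i][col]=1
--             if(solvenq(board,col+1)):
--                 return True
--             board[i][col]=0
--     return False
-- ===== SOURCE B (Python) =====
-- n = 4
--
-- def solvenq(board, col):
--     if col == 4:
--         return True
--     # index the queens already placed in columns 0..col-1, once per call
--     used_rows = set()
--     used_diag = set()      # r - c
--     used_anti = set()      # r + c
--     for c in range(col):
--         for r in range(4):
--             if board[r][c] == 1:
--                 used_rows.add(r)
--                 used_diag.add(r - c)
--                 used_anti.add(r + c)
--     for i in range(4):
--         if (board[i][col] != 1            # the target cell itself must be free
--                 and i not in used_rows
--                 and i - col not in used_diag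
--                 and i + col not in used_anti):
--             board[i][col] = 1
--             if solvenq(board, col + 1):
--                 return True
--             board[i][col] = 0
--     return False
-- ===== Notes on version B (the rewrite author's own statement) =====
-- stated objective: alternative
-- what changed: A's issafe rescans the row and both diagonals for every candidate square; B builds three occupancy sets (rows, r-c diagonals, r+c anti-diagonals) once per call from columns 0..col-1 and tests each candidate by O(1) set membership plus the target cell itself, keeping the placement/backtracking loop and its in-place board mutation identical.
-- outside the precondition, e.g. on solvenq([[0, 0, 0, 1], [0, 0, 0, 1], [0, 0, 0, 0], [0, 0, 0, 1]], -1): A returns True, B returns False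
import Mathlib
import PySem

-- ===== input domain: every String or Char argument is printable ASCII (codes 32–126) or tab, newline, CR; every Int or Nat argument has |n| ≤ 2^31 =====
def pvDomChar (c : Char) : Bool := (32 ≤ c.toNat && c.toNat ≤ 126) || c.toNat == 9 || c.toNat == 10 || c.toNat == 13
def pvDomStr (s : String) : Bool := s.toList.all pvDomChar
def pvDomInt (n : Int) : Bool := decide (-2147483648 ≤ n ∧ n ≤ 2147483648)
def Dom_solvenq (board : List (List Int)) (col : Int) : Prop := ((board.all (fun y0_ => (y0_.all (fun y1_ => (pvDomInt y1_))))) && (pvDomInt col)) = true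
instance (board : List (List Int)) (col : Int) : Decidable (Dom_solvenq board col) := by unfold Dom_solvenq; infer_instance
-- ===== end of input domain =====

-- B replaces A's per-candidate rescanning `issafe` by three occupancy sets (rows, r-c diagonals,
-- r+c anti-diagonals) built once per call from columns 0..col-1; the placement/backtracking loop
-- (and its in-place board mutation, identical in both programs) is unchanged; equivalence is about
-- the returned Bool.

-- board[r][c] read with default 0 (all admitted inputs are in range)
def getCell (board : List (List Int)) (r c : Int) : Int :=
  PySem.List.pyGetD (PySem.List.pyGetD board r []) c 0

-- board[r][c] = v (total form; admitted inputs are in range)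
def setCell (board : List (List Int)) (r c : Int) (v : Int) : List (List Int) :=
  PySem.List.pySetD board r (PySem.List.pySetD (PySem.List.pyGetD board r []) c v)

-- ===== PORT A =====
-- first loop of issafe: `for i in range(col): if board[row][i]==1: return False`
def rowHit (board : List (List Int)) (row col : Int) : Bool :=
  (PySem.List.pyRange 0 col 1).any (fun i => getCell board row i == 1)

-- `while row>=0 and col>=0: if board[row][col]==1: return False; row-=1; col-=1`
-- (true = a queen was found). Fuel (col.toNat+1) bounds the iterations exactly: col drops below 0
-- after at most col+1 steps.
def upLeft : Nat → List (List Int) → Int → Int → Bool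
  | 0, _, _, _ => false
  | f+1, b, row, col =>
    if 0 ≤ row ∧ 0 ≤ col then
      if getCell b row col == 1 then true else upLeft f b (row-1) (col-1)
    else false

-- `while row<n and col>=0: …; row+=1; col-=1`   (n = 4)
def downLeft : Nat → List (List Int) → Int → Int → Bool
  | 0, _, _, _ => false
  | f+1, b, row, col =>
    if row < 4 ∧ 0 ≤ col then
      if getCell b row col == 1 then true else downLeft f b (row+1) (col-1)
    else false

def issafe (board : List (List Int)) (row col : Int) : Bool :=
  !rowHit board row col && !upLeft (col.toNat + 1) board row col
    && !downLeft (col.toNat + 1) board row col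

mutual
-- fuel-indexed body of A's solvenq; within Pre_ the initial fuel always suffices
def solvenqF : Nat → List (List Int) → Int → Bool × List (List Int)
  | 0, b, _ => (false, b)
  | f+1, b, col =>
    if col == 4 then (true, b)
    else tryRowsA (PySem.List.pyRange 0 4 1) f b col
  termination_by f _ _ => (f, 0)

-- `for i in range(0,4): if issafe(...): place; recurse; unplace`
def tryRowsA : List Int → Nat → List (List Int) → Int → Bool × List (List Int)
  | [], _, b, _ => (false, b)
  | i :: rest, f, b, col =>
    if issafe b i col then
      let r := solvenqF f (setCell b i col 1) (col+1)
      if r.1 then (true, r.2)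
      else tryRowsA rest f (setCell r.2 i col 0) col
    else tryRowsA rest f b col
  termination_by l f _ _ => (f, l.length + 1)
end

def solvenq (board : List (List Int)) (col : Int) : Bool :=
  (solvenqF ((4 - col).toNat + 1) board col).1

-- ===== PORT B =====
-- the three occupancy sets (used_rows, used_diag, used_anti) built from columns 0..col-1
def buildSets (board : List (List Int)) (col : Int) :
    PySem.Set Int × PySem.Set Int × PySem.Set Int :=
  (PySem.List.pyRange 0 col 1).foldl (fun s c =>
    (PySem.List.pyRange 0 4 1).foldl (fun s r =>
      if getCell board r c == 1 then
        (PySem.Set.add s.1 r, PySem.Set.add s.2.1 (r - c), PySem.Set.add s.2.2 (r + c))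
      else s) s) ([], [], [])

mutual
def solvenqAltF : Nat → List (List Int) → Int → Bool × List (List Int)
  | 0, b, _ => (false, b)
  | f+1, b, col =>
    if col == 4 then (true, b)
    else tryRowsB (PySem.List.pyRange 0 4 1) f b col (buildSets b col)
  termination_by f _ _ => (f, 0)

def tryRowsB : List Int → Nat → List (List Int) → Int →
    PySem.Set Int × PySem.Set Int × PySem.Set Int → Bool × List (List Int)
  | [], _, b, _, _ => (false, b)
  | i :: rest, f, b, col, s =>
    if getCell b i col != 1 && !PySem.Set.contains s.1 i
        && !PySem.Set.contains s.2.1 (i - col) && !PySem.Set.contains s.2.2 (i + col) then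
      let r := solvenqAltF f (setCell b i col 1) (col+1)
      if r.1 then (true, r.2)
      else tryRowsB rest f (setCell r.2 i col 0) col s
    else tryRowsB rest f b col s
  termination_by l f _ _ _ => (f, l.length + 1)
end

def solvenq_alt (board : List (List Int)) (col : Int) : Bool :=
  (solvenqAltF ((4 - col).toNat + 1) board col).1

-- ===== PRECONDITION & SPEC =====
-- Pre_ excludes the inputs where A raises IndexError (fewer than 4 rows, a short row among the
-- first four, col > 4 reaching column indices ≥ 4) together with col < 0 and the remaining col > 4
-- cases, where A's returned value rests on Python's accidental negative-index wraparound /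
-- early loop exits that B's one-pass column scan does not reproduce.
def Pre_solvenq (board : List (List Int)) (col : Int) : Prop :=
  col = 4 ∨ (0 ≤ col ∧ col < 4 ∧ 4 ≤ board.length ∧ ∀ j : Nat, j < 4 → 4 ≤ (board.getD j []).length)
instance (board : List (List Int)) (col : Int) : Decidable (Pre_solvenq board col) := by
  unfold Pre_solvenq; infer_instance

def pvWitness_solvenq : List (List Int) × Int :=
  ([[0,0,0,0],[0,0,0,0],[0,0,0,0],[0,0,0,0]], 0)

def Spec_solvenq (board : List (List Int)) (col : Int) (out : Bool) : Prop := out = solvenq_alt board col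
instance (board : List (List Int)) (col : Int) (out : Bool) : Decidable (Spec_solvenq board col out) := by unfold Spec_solvenq; infer_instance

-- ===== CLAIM (what is proved, stated in full; the proofs are below) =====
def Claim_equal_solvenq : Prop := ∀ (board : List (List Int)) (col : Int), Dom_solvenq board col → Pre_solvenq board col → Spec_solvenq board col (solvenq board col)

-- ===== LEMMAS AND PROOFS =====

lemma upLeft_iff (b : List (List Int)) :
    ∀ (f : Nat) (r c : Int), upLeft f b r c = true ↔
      ∃ k : Nat, k < f ∧ 0 ≤ r - k ∧ 0 ≤ c - k ∧ getCell b (r - k) (c - k) = 1 := by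
  intro f
  induction f with
  | zero => simp [upLeft]
  | succ f ih =>
    intro r c
    simp only [upLeft]
    split_ifs with h1 h2
    · simp only [beq_iff_eq] at h2
      constructor
      · intro _
        exact ⟨0, by omega, by simpa using h1.1, by simpa using h1.2, by simpa using h2⟩
      · intro _; rfl
    · simp only [beq_iff_eq] at h2
      rw [ih]
      constructor
      · rintro ⟨k, hk, h3, h4, h5⟩
        refine ⟨k + 1, by omega, by push_cast; omega, by push_cast; omega, ?_⟩
        have e1 : r - ((k : Int) + 1) = r - 1 - k := by ring
        have e2 : c - ((k : Int) + 1) = c - 1 - k := by ring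
        push_cast
        rw [e1, e2]; exact h5
      · rintro ⟨k, hk, h3, h4, h5⟩
        match k, hk, h3, h4, h5 with
        | 0, _, _, _, h5 => exact absurd (by simpa using h5) h2
        | k+1, hk, h3, h4, h5 =>
          refine ⟨k, by omega, by push_cast at h3 ⊢; omega, by push_cast at h4 ⊢; omega, ?_⟩
          have e1 : r - 1 - (k : Int) = r - ((k : Int) + 1) := by ring
          have e2 : c - 1 - (k : Int) = c - ((k : Int) + 1) := by ring
          rw [e1, e2]
          push_cast at h5
          exact h5
    · refine ⟨fun h => absurd h (by simp), ?_⟩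
      rintro ⟨k, hk, h3, h4, h5⟩
      exact absurd ⟨by omega, by omega⟩ h1

lemma downLeft_iff (b : List (List Int)) :
    ∀ (f : Nat) (r c : Int), downLeft f b r c = true ↔
      ∃ k : Nat, k < f ∧ r + k < 4 ∧ 0 ≤ c - k ∧ getCell b (r + k) (c - k) = 1 := by
  intro f
  induction f with
  | zero => simp [downLeft]
  | succ f ih =>
    intro r c
    simp only [downLeft]
    split_ifs with h1 h2
    · simp only [beq_iff_eq] at h2
      constructor
      · intro _
        exact ⟨0, by omega, by simpa using h1.1, by simpa using h1.2, by simpa using h2⟩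
      · intro _; rfl
    · simp only [beq_iff_eq] at h2
      rw [ih]
      constructor
      · rintro ⟨k, hk, h3, h4, h5⟩
        refine ⟨k + 1, by omega, by push_cast; omega, by push_cast; omega, ?_⟩
        have e1 : r + ((k : Int) + 1) = r + 1 + k := by ring
        have e2 : c - ((k : Int) + 1) = c - 1 - k := by ring
        push_cast
        rw [e1, e2]; exact h5
      · rintro ⟨k, hk, h3, h4, h5⟩
        match k, hk, h3, h4, h5 with
        | 0, _, _, _, h5 => exact absurd (by simpa using h5) h2
        | k+1, hk, h3, h4, h5 =>
          refine ⟨k, by omega, by push_cast at h3 ⊢; omega, by push_cast at h4 ⊢; omega, ?_⟩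
          have e1 : r + 1 + (k : Int) = r + ((k : Int) + 1) := by ring
          have e2 : c - 1 - (k : Int) = c - ((k : Int) + 1) := by ring
          rw [e1, e2]
          push_cast at h5
          exact h5
    · refine ⟨fun h => absurd h (by simp), ?_⟩
      rintro ⟨k, hk, h3, h4, h5⟩
      exact absurd ⟨by omega, by omega⟩ h1

lemma rowHit_iff (b : List (List Int)) (row col : Int) :
    rowHit b row col = true ↔ ∃ c, 0 ≤ c ∧ c < col ∧ getCell b row c = 1 := by
  simp only [rowHit, List.any_eq_true, PySem.List.mem_pyRange_one, beq_iff_eq]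
  constructor
  · rintro ⟨c, ⟨h1, h2⟩, h3⟩; exact ⟨c, h1, h2, h3⟩
  · rintro ⟨c, h1, h2, h3⟩; exact ⟨c, ⟨h1, h2⟩, h3⟩

-- the inner fold of buildSets (one column), named for the proofs
def bstep (b : List (List Int)) (s : PySem.Set Int × PySem.Set Int × PySem.Set Int) (c : Int) :
    PySem.Set Int × PySem.Set Int × PySem.Set Int :=
  (PySem.List.pyRange 0 4 1).foldl (fun s r =>
    if getCell b r c == 1 then
      (PySem.Set.add s.1 r, PySem.Set.add s.2.1 (r - c), PySem.Set.add s.2.2 (r + c))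
    else s) s

lemma buildSets_eq (b : List (List Int)) (col : Int) :
    buildSets b col = (PySem.List.pyRange 0 col 1).foldl (bstep b) ([], [], []) := rfl

-- one row-step of the inner fold
def istep (b : List (List Int)) (c : Int) (s : PySem.Set Int × PySem.Set Int × PySem.Set Int)
    (r : Int) : PySem.Set Int × PySem.Set Int × PySem.Set Int :=
  if getCell b r c == 1 then
    (PySem.Set.add s.1 r, PySem.Set.add s.2.1 (r - c), PySem.Set.add s.2.2 (r + c))
  else s

lemma bstep_eq (b : List (List Int)) (s : PySem.Set Int × PySem.Set Int × PySem.Set Int)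
    (c : Int) : bstep b s c = (PySem.List.pyRange 0 4 1).foldl (istep b c) s := rfl

lemma istep_mem (b : List (List Int)) (c : Int)
    (s : PySem.Set Int × PySem.Set Int × PySem.Set Int) (r x : Int) :
    (x ∈ (istep b c s r).1 ↔ x ∈ s.1 ∨ (getCell b r c = 1 ∧ x = r)) ∧
    (x ∈ (istep b c s r).2.1 ↔ x ∈ s.2.1 ∨ (getCell b r c = 1 ∧ x = r - c)) ∧
    (x ∈ (istep b c s r).2.2 ↔ x ∈ s.2.2 ∨ (getCell b r c = 1 ∧ x = r + c)) := by
  obtain ⟨s1, s2, s3⟩ := s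
  unfold istep
  simp only [beq_iff_eq]
  split_ifs with h <;> simp [PySem.Set.mem_add, h]

lemma ifold_mem (b : List (List Int)) (c : Int) :
    ∀ (l : List Int) (s : PySem.Set Int × PySem.Set Int × PySem.Set Int) (x : Int),
    (x ∈ (l.foldl (istep b c) s).1 ↔ x ∈ s.1 ∨ ∃ r, r ∈ l ∧ getCell b r c = 1 ∧ x = r) ∧
    (x ∈ (l.foldl (istep b c) s).2.1 ↔ x ∈ s.2.1 ∨ ∃ r, r ∈ l ∧ getCell b r c = 1 ∧ x = r - c) ∧
    (x ∈ (l.foldl (istep b c) s).2.2 ↔ x ∈ s.2.2 ∨ ∃ r, r ∈ l ∧ getCell b r c = 1 ∧ x = r + c) := by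
  intro l
  induction l with
  | nil => intro s x; simp
  | cons r l ih =>
    intro s x
    simp only [List.foldl_cons]
    refine ⟨?_, ?_, ?_⟩
    · rw [(ih (istep b c s r) x).1, (istep_mem b c s r x).1]
      constructor
      · rintro ((h | h) | ⟨r', hr', h⟩)
        · exact Or.inl h
        · exact Or.inr ⟨r, List.mem_cons_self, h⟩
        · exact Or.inr ⟨r', List.mem_cons_of_mem _ hr', h⟩
      · rintro (h | ⟨r', hr', h⟩)
        · exact Or.inl (Or.inl h)
        · rcases List.mem_cons.mp hr' with he | he
          · subst he; exact Or.inl (Or.inr h)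
          · exact Or.inr ⟨r', he, h⟩
    · rw [(ih (istep b c s r) x).2.1, (istep_mem b c s r x).2.1]
      constructor
      · rintro ((h | h) | ⟨r', hr', h⟩)
        · exact Or.inl h
        · exact Or.inr ⟨r, List.mem_cons_self, h⟩
        · exact Or.inr ⟨r', List.mem_cons_of_mem _ hr', h⟩
      · rintro (h | ⟨r', hr', h⟩)
        · exact Or.inl (Or.inl h)
        · rcases List.mem_cons.mp hr' with he | he
          · subst he; exact Or.inl (Or.inr h)
          · exact Or.inr ⟨r', he, h⟩
    · rw [(ih (istep b c s r) x).2.2, (istep_mem b c s r x).2.2]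
      constructor
      · rintro ((h | h) | ⟨r', hr', h⟩)
        · exact Or.inl h
        · exact Or.inr ⟨r, List.mem_cons_self, h⟩
        · exact Or.inr ⟨r', List.mem_cons_of_mem _ hr', h⟩
      · rintro (h | ⟨r', hr', h⟩)
        · exact Or.inl (Or.inl h)
        · rcases List.mem_cons.mp hr' with he | he
          · subst he; exact Or.inl (Or.inr h)
          · exact Or.inr ⟨r', he, h⟩

lemma bstep_mem (b : List (List Int)) (s : PySem.Set Int × PySem.Set Int × PySem.Set Int)
    (c x : Int) :
    (x ∈ (bstep b s c).1 ↔ x ∈ s.1 ∨ ∃ r, 0 ≤ r ∧ r < 4 ∧ getCell b r c = 1 ∧ x = r) ∧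
    (x ∈ (bstep b s c).2.1 ↔ x ∈ s.2.1 ∨ ∃ r, 0 ≤ r ∧ r < 4 ∧ getCell b r c = 1 ∧ x = r - c) ∧
    (x ∈ (bstep b s c).2.2 ↔ x ∈ s.2.2 ∨ ∃ r, 0 ≤ r ∧ r < 4 ∧ getCell b r c = 1 ∧ x = r + c) := by
  rw [bstep_eq]
  have h := ifold_mem b c (PySem.List.pyRange 0 4 1) s x
  refine ⟨h.1.trans ?_, h.2.1.trans ?_, h.2.2.trans ?_⟩ <;>
  · simp only [PySem.List.mem_pyRange_one]
    constructor
    · rintro (h | ⟨r, ⟨h0, h4⟩, hr⟩)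
      exacts [Or.inl h, Or.inr ⟨r, h0, h4, hr⟩]
    · rintro (h | ⟨r, h0, h4, hr⟩)
      exacts [Or.inl h, Or.inr ⟨r, ⟨h0, h4⟩, hr⟩]

lemma fold_mem1 (b : List (List Int)) :
    ∀ (l : List Int) (s : PySem.Set Int × PySem.Set Int × PySem.Set Int) (x : Int),
    x ∈ (l.foldl (bstep b) s).1 ↔
      x ∈ s.1 ∨ ∃ c, c ∈ l ∧ ∃ r, 0 ≤ r ∧ r < 4 ∧ getCell b r c = 1 ∧ x = r := by
  intro l
  induction l with
  | nil => simp
  | cons c l ih =>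
    intro s x
    simp only [List.foldl_cons]
    rw [ih, (bstep_mem b s c x).1]
    constructor
    · rintro ((h | ⟨r, hr⟩) | ⟨c', hc', r, hr⟩)
      · exact Or.inl h
      · exact Or.inr ⟨c, List.mem_cons_self, r, hr⟩
      · exact Or.inr ⟨c', List.mem_cons_of_mem _ hc', r, hr⟩
    · rintro (h | ⟨c', hc', r, hr⟩)
      · exact Or.inl (Or.inl h)
      · rcases List.mem_cons.mp hc' with h | h
        · subst h; exact Or.inl (Or.inr ⟨r, hr⟩)
        · exact Or.inr ⟨c', h, r, hr⟩

lemma fold_mem2 (b : List (List Int)) :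
    ∀ (l : List Int) (s : PySem.Set Int × PySem.Set Int × PySem.Set Int) (x : Int),
    x ∈ (l.foldl (bstep b) s).2.1 ↔
      x ∈ s.2.1 ∨ ∃ c, c ∈ l ∧ ∃ r, 0 ≤ r ∧ r < 4 ∧ getCell b r c = 1 ∧ x = r - c := by
  intro l
  induction l with
  | nil => simp
  | cons c l ih =>
    intro s x
    simp only [List.foldl_cons]
    rw [ih, (bstep_mem b s c x).2.1]
    constructor
    · rintro ((h | ⟨r, hr⟩) | ⟨c', hc', r, hr⟩)
      · exact Or.inl h
      · exact Or.inr ⟨c, List.mem_cons_self, r, hr⟩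
      · exact Or.inr ⟨c', List.mem_cons_of_mem _ hc', r, hr⟩
    · rintro (h | ⟨c', hc', r, hr⟩)
      · exact Or.inl (Or.inl h)
      · rcases List.mem_cons.mp hc' with h | h
        · subst h; exact Or.inl (Or.inr ⟨r, hr⟩)
        · exact Or.inr ⟨c', h, r, hr⟩

lemma fold_mem3 (b : List (List Int)) :
    ∀ (l : List Int) (s : PySem.Set Int × PySem.Set Int × PySem.Set Int) (x : Int),
    x ∈ (l.foldl (bstep b) s).2.2 ↔
      x ∈ s.2.2 ∨ ∃ c, c ∈ l ∧ ∃ r, 0 ≤ r ∧ r < 4 ∧ getCell b r c = 1 ∧ x = r + c := by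
  intro l
  induction l with
  | nil => simp
  | cons c l ih =>
    intro s x
    simp only [List.foldl_cons]
    rw [ih, (bstep_mem b s c x).2.2]
    constructor
    · rintro ((h | ⟨r, hr⟩) | ⟨c', hc', r, hr⟩)
      · exact Or.inl h
      · exact Or.inr ⟨c, List.mem_cons_self, r, hr⟩
      · exact Or.inr ⟨c', List.mem_cons_of_mem _ hc', r, hr⟩
    · rintro (h | ⟨c', hc', r, hr⟩)
      · exact Or.inl (Or.inl h)
      · rcases List.mem_cons.mp hc' with h | h
        · subst h; exact Or.inl (Or.inr ⟨r, hr⟩)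
        · exact Or.inr ⟨c', h, r, hr⟩

-- simultaneous membership characterisation of the three sets
lemma mem_buildSets (b : List (List Int)) (col : Int) (x : Int) :
    (x ∈ (buildSets b col).1 ↔
      ∃ c, 0 ≤ c ∧ c < col ∧ ∃ r, 0 ≤ r ∧ r < 4 ∧ getCell b r c = 1 ∧ x = r) ∧
    (x ∈ (buildSets b col).2.1 ↔
      ∃ c, 0 ≤ c ∧ c < col ∧ ∃ r, 0 ≤ r ∧ r < 4 ∧ getCell b r c = 1 ∧ x = r - c) ∧
    (x ∈ (buildSets b col).2.2 ↔
      ∃ c, 0 ≤ c ∧ c < col ∧ ∃ r, 0 ≤ r ∧ r < 4 ∧ getCell b r c = 1 ∧ x = r + c) := by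
  rw [buildSets_eq]
  refine ⟨?_, ?_, ?_⟩
  · rw [fold_mem1]
    simp only [PySem.List.mem_pyRange_one, List.not_mem_nil, false_or]
    constructor
    · rintro ⟨c, ⟨h1, h2⟩, hr⟩; exact ⟨c, h1, h2, hr⟩
    · rintro ⟨c, h1, h2, hr⟩; exact ⟨c, ⟨h1, h2⟩, hr⟩
  · rw [fold_mem2]
    simp only [PySem.List.mem_pyRange_one, List.not_mem_nil, false_or]
    constructor
    · rintro ⟨c, ⟨h1, h2⟩, hr⟩; exact ⟨c, h1, h2, hr⟩
    · rintro ⟨c, h1, h2, hr⟩; exact ⟨c, ⟨h1, h2⟩, hr⟩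
  · rw [fold_mem3]
    simp only [PySem.List.mem_pyRange_one, List.not_mem_nil, false_or]
    constructor
    · rintro ⟨c, ⟨h1, h2⟩, hr⟩; exact ⟨c, h1, h2, hr⟩
    · rintro ⟨c, h1, h2, hr⟩; exact ⟨c, ⟨h1, h2⟩, hr⟩

-- A's rescanning safety test coincides with B's set-membership test
lemma safety_eq (b : List (List Int)) (i col : Int)
    (hi0 : 0 ≤ i) (hi4 : i < 4) (hc0 : 0 ≤ col) :
    issafe b i col =
      (getCell b i col != 1 && !PySem.Set.contains (buildSets b col).1 i
        && !PySem.Set.contains (buildSets b col).2.1 (i - col)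
        && !PySem.Set.contains (buildSets b col).2.2 (i + col)) := by
  rw [Bool.eq_iff_iff]
  simp only [issafe, Bool.and_eq_true, Bool.not_eq_true', Bool.eq_false_iff, ne_eq, bne_iff_ne]
  rw [rowHit_iff, upLeft_iff b (col.toNat + 1) i col, downLeft_iff b (col.toNat + 1) i col,
    PySem.Set.contains_iff, PySem.Set.contains_iff, PySem.Set.contains_iff,
    (mem_buildSets b col i).1, (mem_buildSets b col (i - col)).2.1,
    (mem_buildSets b col (i + col)).2.2]
  constructor
  · rintro ⟨⟨hrow, hup⟩, hdown⟩
    refine ⟨⟨⟨?_, ?_⟩, ?_⟩, ?_⟩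
    · intro hcell
      exact hup ⟨0, by omega, by simpa using hi0, by simpa using hc0, by simpa using hcell⟩
    · rintro ⟨c, hc1, hc2, r, hr1, hr2, hcell, hx⟩
      exact hrow ⟨c, hc1, hc2, hx ▸ hcell⟩
    · rintro ⟨c, hc1, hc2, r, hr1, hr2, hcell, hx⟩
      refine hup ⟨(col - c).toNat, by omega, by omega, by omega, ?_⟩
      have e1 : i - ((col - c).toNat : Int) = r := by omega
      have e2 : col - ((col - c).toNat : Int) = c := by omega
      rw [e1, e2]; exact hcell
    · rintro ⟨c, hc1, hc2, r, hr1, hr2, hcell, hx⟩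
      refine hdown ⟨(col - c).toNat, by omega, by omega, by omega, ?_⟩
      have e1 : i + ((col - c).toNat : Int) = r := by omega
      have e2 : col - ((col - c).toNat : Int) = c := by omega
      rw [e1, e2]; exact hcell
  · rintro ⟨⟨⟨hcell, hrows⟩, hdiag⟩, hanti⟩
    refine ⟨⟨?_, ?_⟩, ?_⟩
    · rintro ⟨c, hc1, hc2, hcc⟩
      exact hrows ⟨c, hc1, hc2, i, hi0, hi4, hcc, rfl⟩
    · rintro ⟨k, hk, h1, h2, h3⟩
      rcases Nat.eq_zero_or_pos k with hk0 | hkpos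
      · subst hk0; exact hcell (by simpa using h3)
      · exact hdiag ⟨col - k, by omega, by omega, i - k, by omega, by omega, h3, by omega⟩
    · rintro ⟨k, hk, h1, h2, h3⟩
      rcases Nat.eq_zero_or_pos k with hk0 | hkpos
      · subst hk0; exact hcell (by simpa using h3)
      · exact hanti ⟨col - k, by omega, by omega, i + k, by omega, by omega, h3, by omega⟩

-- writing in column col leaves every cell of an earlier column unchanged
lemma getCell_setCell_lt (b : List (List Int)) (i col v r c : Int)
    (hi : 0 ≤ i) (hr : 0 ≤ r) (hc : 0 ≤ c) (hlt : c < col) :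
    getCell (setCell b i col v) r c = getCell b r c := by
  unfold getCell setCell
  rw [PySem.List.pySetD_of_nonneg _ _ hi, PySem.List.pyGetD_of_nonneg _ _ hr,
    PySem.List.pyGetD_of_nonneg _ _ hr, PySem.List.pyGetD_of_nonneg _ _ hi,
    PySem.List.pySetD_of_nonneg _ _ (by omega : (0:Int) ≤ col)]
  rw [List.getD_eq_getElem?_getD, List.getD_eq_getElem?_getD (l := b), List.getElem?_set]
  split_ifs with h1 h2
  · simp only [Option.getD_some]
    rw [PySem.List.pyGetD_of_nonneg _ _ hc, PySem.List.pyGetD_of_nonneg _ _ hc]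
    rw [List.getD_eq_getElem?_getD, List.getD_eq_getElem?_getD, List.getElem?_set]
    have hne : col.toNat ≠ c.toNat := by omega
    simp only [hne, if_false]
    rw [List.getD_eq_getElem?_getD, h1]
  · simp only [Option.getD_none]
    rw [List.getD_eq_getElem?_getD, List.getElem?_eq_none (by omega : b.length ≤ r.toNat)]
    rfl
  · rfl

-- the recursion at column col never changes a cell of a column < col
lemma presS : ∀ (f : Nat) (b : List (List Int)) (col r c : Int),
    0 ≤ r → 0 ≤ c → c < col → getCell (solvenqF f b col).2 r c = getCell b r c := by
  intro f
  induction f with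
  | zero => intro b col r c _ _ _; simp [solvenqF]
  | succ f ih =>
    have hQ : ∀ (l : List Int), (∀ i ∈ l, 0 ≤ i) → ∀ b col r c, 0 ≤ r → 0 ≤ c → c < col →
        getCell (tryRowsA l f b col).2 r c = getCell b r c := by
      intro l
      induction l with
      | nil => intro _ b col r c _ _ _; simp [tryRowsA]
      | cons i rest ihl =>
        intro hmem b col r c hr hc hlt
        have hi : 0 ≤ i := hmem i List.mem_cons_self
        have hmem' : ∀ j ∈ rest, 0 ≤ j := fun j hj => hmem j (List.mem_cons_of_mem _ hj)
        simp only [tryRowsA]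
        cases hsafe : issafe b i col with
        | true =>
          rw [if_pos rfl]
          cases hb : (solvenqF f (setCell b i col 1) (col + 1)).1 with
          | true =>
            rw [if_pos rfl]
            rw [ih _ _ r c hr hc (by omega : c < col + 1)]
            exact getCell_setCell_lt b i col 1 r c hi hr hc hlt
          | false =>
            rw [if_neg (by simp)]
            rw [ihl hmem' _ col r c hr hc hlt,
              getCell_setCell_lt _ i col 0 r c hi hr hc hlt,
              ih _ _ r c hr hc (by omega : c < col + 1)]
            exact getCell_setCell_lt b i col 1 r c hi hr hc hlt
        | false =>
          rw [if_neg (by simp)]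
          exact ihl hmem' b col r c hr hc hlt
    intro b col r c hr hc hlt
    simp only [solvenqF]
    split_ifs with h4
    · rfl
    · exact hQ _ (fun j hj => (PySem.List.mem_pyRange_one.mp hj).1) b col r c hr hc hlt

lemma buildSets_congr (b b' : List (List Int)) (col : Int)
    (h : ∀ r c : Int, 0 ≤ r → r < 4 → 0 ≤ c → c < col → getCell b r c = getCell b' r c) :
    buildSets b col = buildSets b' col := by
  unfold buildSets
  refine PySem.List.foldl_congr_mem _ _ _ _ ?_
  intro s c hc
  rcases PySem.List.mem_pyRange_one.mp hc with ⟨hc0, hccol⟩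
  refine PySem.List.foldl_congr_mem _ _ _ _ ?_
  intro s' r hr
  rcases PySem.List.mem_pyRange_one.mp hr with ⟨hr0, hr4⟩
  rw [h r c hr0 hr4 hc0 hccol]

lemma mainS : ∀ (f : Nat) (b : List (List Int)) (col : Int), 0 ≤ col →
    solvenqF f b col = solvenqAltF f b col := by
  intro f
  induction f with
  | zero => intro b col _; simp [solvenqF, solvenqAltF]
  | succ f ih =>
    intro b col hcol
    simp only [solvenqF, solvenqAltF]
    split_ifs with h4
    · rfl
    · have hQ : ∀ (l : List Int), (∀ i ∈ l, 0 ≤ i ∧ i < 4) → ∀ b',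
          buildSets b' col = buildSets b col →
          tryRowsA l f b' col = tryRowsB l f b' col (buildSets b col) := by
        intro l
        induction l with
        | nil => intro _ b' _; simp [tryRowsA, tryRowsB]
        | cons i rest ihl =>
          intro hmem b' hsets
          obtain ⟨hi0, hi4⟩ := hmem i List.mem_cons_self
          have hmem' : ∀ j ∈ rest, 0 ≤ j ∧ j < 4 := fun j hj => hmem j (List.mem_cons_of_mem _ hj)
          have hsafe : issafe b' i col =
              (getCell b' i col != 1 && !PySem.Set.contains (buildSets b col).1 i
                && !PySem.Set.contains (buildSets b col).2.1 (i - col)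
                && !PySem.Set.contains (buildSets b col).2.2 (i + col)) := by
            rw [← hsets]; exact safety_eq b' i col hi0 hi4 hcol
          simp only [tryRowsA, tryRowsB]
          rw [← hsafe]
          cases hs : issafe b' i col with
          | false => rw [if_neg (by simp), if_neg (by simp)]; exact ihl hmem' b' hsets
          | true =>
            rw [if_pos rfl, if_pos rfl, ← ih (setCell b' i col 1) (col + 1) (by omega)]
            cases hb : (solvenqF f (setCell b' i col 1) (col + 1)).1 with
            | true => rw [if_pos rfl, if_pos rfl]
            | false =>
              rw [if_neg (by simp), if_neg (by simp)]
              refine ihl hmem' _ ?_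
              have hcongr : buildSets (setCell (solvenqF f (setCell b' i col 1) (col + 1)).2 i col 0) col
                  = buildSets b' col := by
                apply buildSets_congr
                intro r c hr hr4 hc hlt
                rw [getCell_setCell_lt _ i col 0 r c hi0 hr hc hlt,
                  presS f (setCell b' i col 1) (col + 1) r c hr hc (by omega : c < col + 1)]
                exact getCell_setCell_lt b' i col 1 r c hi0 hr hc hlt
              exact hcongr.trans hsets
      exact hQ (PySem.List.pyRange 0 4 1)
        (fun j hj => PySem.List.mem_pyRange_one.mp hj) b rfl

-- ===== VERDICT (by name: the statement is the Claim_ definition above) =====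
theorem solvenq_spec : Claim_equal_solvenq := by
  intro board col _ hpre
  unfold Spec_solvenq solvenq solvenq_alt
  have hc : 0 ≤ col := by rcases hpre with h | h; omega; exact h.1
  rw [mainS _ _ _ hc]
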